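-- pv_equiv track=rewrite | github.com/pypi-data/pypi-mirror-366 | packages/batchfactory/batchfactory-0.6.2.tar.gz/batchfactory-0.6.2/src/batchfactory/op/functional/text_chunking.py | label_and_chunk_texts
-- ===== SOURCE A (Python) =====
-- from typing import List, Dict, NamedTuple, Set, Tuple, Any
--
-- def label_texts(texts:List[str],*,offset=1):
--     """Label each text with a number, starting from `offset`."""
--     return [f"{i + offset}: {text}" for i, text in enumerate(texts)]
--
-- def label_multiline_texts(texts:List[str], *, offset=1) -> List[str]:
--     """Label each multiline text with a number, starting from `offset`."""
--     labeled_texts = []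
--     for i, text in enumerate(texts):
--         text = f"{i + offset}:\n{text}\n\n"
--         labeled_texts.append(text)
--     return labeled_texts
--
-- def group_texts_by_length(texts:List[str], *, chunk_length) -> List[List[str]]:
--     "Group texts by suggested chunk_length. (May exceed if a single line is too long)"
--     groups = [[]]
--     last_group_length = 0
--     for i,line in enumerate(texts):
--         if last_group_length ==0 or (last_group_length + len(line) + 1 <= chunk_length):
--             groups[-1].append(line)
--             last_group_length += len(line) + 1
--         else:
--             groups.append([line])
--             last_group_length = len(line) + 1
--     return groups
--
-- def join_texts(texts:List[str], *, separator="\n") -> str: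
--     """Join a list of texts into a single string with a specified separator."""
--     return separator.join(texts)
--
-- def label_and_chunk_texts(texts:List[str], chunk_length:int, multiline=False) -> List[str]:
--     if multiline:
--         texts = label_multiline_texts(texts)
--     else:
--         texts = label_texts(texts)
--     groups = group_texts_by_length(texts, chunk_length=chunk_length)
--     chunks = [join_texts(group) for group in groups]
--     return chunks
-- ===== SOURCE B (Python) =====
-- def label_and_chunk_texts(texts, chunk_length, multiline=False):
--     """Single fused pass: label each text inline and greedily accumulate
--     joined chunk strings directly (no intermediate groups-of-lists)."""
--     chunks = []
--     cur = ""
--     cur_len = 0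
--     for i, text in enumerate(texts):
--         label = f"{i + 1}:\n{text}\n\n" if multiline else f"{i + 1}: {text}"
--         if cur_len == 0:
--             cur = label
--         elif cur_len + len(label) + 1 <= chunk_length:
--             cur += "\n" + label
--         else:
--             chunks.append(cur)
--             cur = label
--             cur_len = 0
--         cur_len += len(label) + 1
--     chunks.append(cur)
--     return chunks
-- ===== Notes on version B (the rewrite author's own statement) =====
-- stated objective: simpler
-- what changed: B fuses A's three passes (label all texts, group labelled strings into lists, join each group) into one loop over enumerate(texts) that formats each label inline and accumulates the joined chunk string and its running length directly, so the intermediate labelled list and list-of-lists of groups disappear.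
import Mathlib
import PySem

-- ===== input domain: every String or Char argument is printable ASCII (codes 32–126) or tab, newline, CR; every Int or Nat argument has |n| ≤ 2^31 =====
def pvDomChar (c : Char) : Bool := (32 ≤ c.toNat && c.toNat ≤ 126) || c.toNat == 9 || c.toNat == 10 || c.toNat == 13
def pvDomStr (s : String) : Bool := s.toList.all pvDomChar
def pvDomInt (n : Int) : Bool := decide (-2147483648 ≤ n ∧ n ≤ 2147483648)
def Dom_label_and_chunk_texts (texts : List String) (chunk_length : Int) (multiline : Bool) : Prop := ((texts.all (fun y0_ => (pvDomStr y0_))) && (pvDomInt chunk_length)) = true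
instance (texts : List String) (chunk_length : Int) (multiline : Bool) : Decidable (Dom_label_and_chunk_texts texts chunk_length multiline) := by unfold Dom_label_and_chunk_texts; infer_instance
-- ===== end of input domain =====

-- B fuses A's label / group / join passes into one loop that accumulates joined chunk
-- strings directly (objective: simpler — no intermediate list-of-lists-of-strings).
-- Equivalence of the return value is proved for all inputs (both programs are total).

-- ===== PORT A =====

-- label_texts(texts, offset=1)
def pvLabelTexts (texts : List String) (offset : Int) : List String :=
  (PySem.List.enumerate texts 0).map
    (fun p => PySem.Int.toStr (p.1 + offset) ++ ": " ++ p.2)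

-- label_multiline_texts(texts, offset=1)
def pvLabelMultilineTexts (texts : List String) (offset : Int) : List String :=
  (PySem.List.enumerate texts 0).foldl
    (fun acc p => acc ++ [PySem.Int.toStr (p.1 + offset) ++ ":\n" ++ p.2 ++ "\n\n"]) []

-- one iteration of the loop in group_texts_by_length (state: groups, last_group_length)
def pvGroupStep (chunk_length : Int) (st : List (List String) × Int) (line : String) :
    List (List String) × Int :=
  if st.2 = 0 ∨ st.2 + PySem.Str.len line + 1 ≤ chunk_length then
    (st.1.dropLast ++ [st.1.getLastD [] ++ [line]], st.2 + PySem.Str.len line + 1)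
  else
    (st.1 ++ [[line]], PySem.Str.len line + 1)

-- group_texts_by_length(texts, chunk_length)
def pvGroupTextsByLength (texts : List String) (chunk_length : Int) : List (List String) :=
  ((PySem.List.enumerate texts 0).foldl
    (fun st p => pvGroupStep chunk_length st p.2) ([[]], 0)).1

-- join_texts(texts, separator="\n")
def pvJoinTexts (texts : List String) (separator : String) : String :=
  PySem.Str.join separator texts

def label_and_chunk_texts (texts : List String) (chunk_length : Int) (multiline : Bool) :
    List String :=
  let texts' := if multiline then pvLabelMultilineTexts texts 1 else pvLabelTexts texts 1
  (pvGroupTextsByLength texts' chunk_length).map (fun g => pvJoinTexts g "\n")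

-- ===== PORT B =====

-- one iteration of B's fused loop (state: chunks, cur, cur_len)
def pvAltStep (chunk_length : Int) (multiline : Bool)
    (st : List String × String × Int) (p : Int × String) : List String × String × Int :=
  let label := if multiline then PySem.Int.toStr (p.1 + 1) ++ ":\n" ++ p.2 ++ "\n\n"
               else PySem.Int.toStr (p.1 + 1) ++ ": " ++ p.2
  if st.2.2 = 0 then
    (st.1, label, PySem.Str.len label + 1)
  else if st.2.2 + PySem.Str.len label + 1 ≤ chunk_length then
    (st.1, st.2.1 ++ "\n" ++ label, st.2.2 + PySem.Str.len label + 1)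
  else
    (st.1 ++ [st.2.1], label, PySem.Str.len label + 1)

def label_and_chunk_texts_alt (texts : List String) (chunk_length : Int) (multiline : Bool) :
    List String :=
  let st := (PySem.List.enumerate texts 0).foldl (pvAltStep chunk_length multiline) ([], "", 0)
  st.1 ++ [st.2.1]

-- ===== PRECONDITION & SPEC =====
def Spec_label_and_chunk_texts (texts : List String) (chunk_length : Int) (multiline : Bool) (out : List String) : Prop := out = label_and_chunk_texts_alt texts chunk_length multiline
instance (texts : List String) (chunk_length : Int) (multiline : Bool) (out : List String) : Decidable (Spec_label_and_chunk_texts texts chunk_length multiline out) := by unfold Spec_label_and_chunk_texts; infer_instance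

-- ===== CLAIM (what is proved, stated in full; the proofs are below) =====
def Claim_equal_label_and_chunk_texts : Prop := ∀ (texts : List String) (chunk_length : Int) (multiline : Bool), Dom_label_and_chunk_texts texts chunk_length multiline → Spec_label_and_chunk_texts texts chunk_length multiline (label_and_chunk_texts texts chunk_length multiline)

-- ===== LEMMAS AND PROOFS =====

-- total joined length (+1 per element) of the current group; tracks A's last_group_length
def pvWeight (g : List String) : Int := (g.map (fun s => PySem.Str.len s + 1)).sum

theorem pvWeight_nil : pvWeight [] = 0 := rfl

theorem pvWeight_append (g : List String) (l : String) :
    pvWeight (g ++ [l]) = pvWeight g + (PySem.Str.len l + 1) := by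
  simp [pvWeight]

theorem pvWeight_eq_zero_iff (g : List String) : pvWeight g = 0 ↔ g = [] := by
  induction g with
  | nil => simp [pvWeight]
  | cons a g ih =>
    simp only [pvWeight, List.map_cons, List.sum_cons] at *
    constructor
    · intro h
      have h1 : (0:Int) ≤ PySem.Str.len a := by simp [PySem.Str.len_eq]
      have h2 : (0:Int) ≤ (g.map (fun s => PySem.Str.len s + 1)).sum := by
        apply List.sum_nonneg
        intro x hx
        simp only [List.mem_map] at hx
        obtain ⟨s, _, rfl⟩ := hx
        have : (0:Int) ≤ PySem.Str.len s := by simp [PySem.Str.len_eq]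
        omega
      omega
    · intro h; cases h

theorem pvWeight_singleton (l : String) : pvWeight [l] = PySem.Str.len l + 1 := by
  simp [pvWeight]

theorem pvJoin_nil (sep : String) : PySem.Str.join sep [] = "" := by
  rw [← String.toList_inj]
  simp [PySem.Str.toList_join, PySem.Chars.join_nil]

theorem pvJoin_singleton (sep l : String) : PySem.Str.join sep [l] = l := by
  rw [← String.toList_inj]
  simp [PySem.Str.toList_join, PySem.Chars.join_singleton]

theorem pvCharsJoin_snoc (sep l : List Char) (ps : List (List Char)) (h : ps ≠ []) :
    PySem.Chars.join sep (ps ++ [l]) = PySem.Chars.join sep ps ++ sep ++ l := by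
  induction ps with
  | nil => exact absurd rfl h
  | cons p ps ih =>
    cases ps with
    | nil =>
      simp [PySem.Chars.join_cons_cons, PySem.Chars.join_singleton]
    | cons q rest =>
      have e1 : (p :: q :: rest) ++ [l] = p :: q :: (rest ++ [l]) := by simp
      rw [e1, PySem.Chars.join_cons_cons]
      have e2 : q :: (rest ++ [l]) = (q :: rest) ++ [l] := by simp
      rw [e2, ih (by simp), PySem.Chars.join_cons_cons]
      simp

theorem pvJoin_snoc (sep : String) (g : List String) (l : String) (hg : g ≠ []) :
    PySem.Str.join sep (g ++ [l]) = PySem.Str.join sep g ++ sep ++ l := by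
  rw [← String.toList_inj]
  simp only [String.toList_append, PySem.Str.toList_join, List.map_append, List.map_cons,
    List.map_nil]
  exact pvCharsJoin_snoc sep.toList l.toList (g.map String.toList) (by simpa using hg)

-- the grouping loop ignores the enumeration index
theorem pvFoldl_enumerate_snd {β γ : Type} (f : γ → β → γ) (ys : List β) (s : Int) (init : γ) :
    (PySem.List.enumerate ys s).foldl (fun st p => f st p.2) init = ys.foldl f init := by
  induction ys generalizing s init with
  | nil => simp [PySem.List.enumerate_nil]
  | cons y ys ih => rw [PySem.List.enumerate_cons]; simp [ih]

-- foldl-append builds the same list as map (used for label_multiline_texts)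
theorem pvFoldl_append_map {α β : Type} (f : α → β) (xs : List α) (acc : List β) :
    xs.foldl (fun a x => a ++ [f x]) acc = acc ++ xs.map f := by
  induction xs generalizing acc with
  | nil => simp
  | cons x xs ih => simp [ih]

-- the core loop invariant: A's grouping loop followed by joining equals B's fused loop
theorem pvLoop_eq (cl : Int) (lab : Int × String → String)
    (L : List (Int × String)) (gs : List (List String)) (g : List String) (n : Int)
    (hn : n = pvWeight g) :
    ((L.foldl (fun st p => pvGroupStep cl st (lab p)) (gs ++ [g], n)).1).map
        (fun grp => pvJoinTexts grp "\n")
      = (let st := L.foldl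
            (fun st p =>
              if st.2.2 = 0 then (st.1, lab p, PySem.Str.len (lab p) + 1)
              else if st.2.2 + PySem.Str.len (lab p) + 1 ≤ cl then
                (st.1, st.2.1 ++ "\n" ++ lab p, st.2.2 + PySem.Str.len (lab p) + 1)
              else (st.1 ++ [st.2.1], lab p, PySem.Str.len (lab p) + 1))
            (gs.map (fun grp => pvJoinTexts grp "\n"), pvJoinTexts g "\n", n)
         st.1 ++ [st.2.1]) := by
  induction L generalizing gs g n with
  | nil => simp [pvJoinTexts]
  | cons p L ih =>
    simp only [List.foldl_cons]
    by_cases h0 : n = 0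
    · -- current group is empty
      have hg : g = [] := (pvWeight_eq_zero_iff g).mp (by omega)
      subst hg
      have hA : pvGroupStep cl (gs ++ [[]], n) (lab p)
          = (gs ++ [[lab p]], PySem.Str.len (lab p) + 1) := by
        simp [pvGroupStep, h0]
      rw [hA]
      simp only [h0, if_true]
      have := ih gs [lab p] (PySem.Str.len (lab p) + 1) (pvWeight_singleton _).symm
      rw [this]
      simp [pvJoinTexts, pvJoin_singleton]
    · by_cases hle : n + PySem.Str.len (lab p) + 1 ≤ cl
      · -- append to current group
        have hg : g ≠ [] := by
          intro h; subst h; exact h0 (by simpa [pvWeight_nil] using hn)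
        have hA : pvGroupStep cl (gs ++ [g], n) (lab p)
            = (gs ++ [g ++ [lab p]], n + PySem.Str.len (lab p) + 1) := by
          simp only [pvGroupStep]
          rw [if_pos (Or.inr (by omega))]
          simp
        rw [hA]
        rw [if_neg h0, if_pos (by omega)]
        have := ih gs (g ++ [lab p]) (n + PySem.Str.len (lab p) + 1)
          (by rw [pvWeight_append]; omega)
        rw [this]
        simp [pvJoinTexts, pvJoin_snoc _ _ _ hg]
      · -- start a new group
        have hA : pvGroupStep cl (gs ++ [g], n) (lab p)
            = ((gs ++ [g]) ++ [[lab p]], PySem.Str.len (lab p) + 1) := by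
          simp only [pvGroupStep]
          rw [if_neg (by simp only [not_or]; exact ⟨h0, by omega⟩)]
        rw [hA]
        rw [if_neg h0, if_neg (by omega)]
        have := ih (gs ++ [g]) [lab p] (PySem.Str.len (lab p) + 1) (pvWeight_singleton _).symm
        rw [this]
        simp [pvJoinTexts, pvJoin_singleton]

theorem pvJoinTexts_nil : pvJoinTexts [] "\n" = "" := by
  simp [pvJoinTexts, pvJoin_nil]

theorem pvAlt_eq_step_false (cl : Int) :
    pvAltStep cl false = (fun (st : List String × String × Int) (p : Int × String) =>
      if st.2.2 = 0 then (st.1, PySem.Int.toStr (p.1 + 1) ++ ": " ++ p.2,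
        PySem.Str.len (PySem.Int.toStr (p.1 + 1) ++ ": " ++ p.2) + 1)
      else if st.2.2 + PySem.Str.len (PySem.Int.toStr (p.1 + 1) ++ ": " ++ p.2) + 1 ≤ cl then
        (st.1, st.2.1 ++ "\n" ++ (PySem.Int.toStr (p.1 + 1) ++ ": " ++ p.2),
          st.2.2 + PySem.Str.len (PySem.Int.toStr (p.1 + 1) ++ ": " ++ p.2) + 1)
      else (st.1 ++ [st.2.1], PySem.Int.toStr (p.1 + 1) ++ ": " ++ p.2,
        PySem.Str.len (PySem.Int.toStr (p.1 + 1) ++ ": " ++ p.2) + 1)) := by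
  funext st p
  simp [pvAltStep]

theorem pvAlt_eq_step_true (cl : Int) :
    pvAltStep cl true = (fun (st : List String × String × Int) (p : Int × String) =>
      if st.2.2 = 0 then (st.1, PySem.Int.toStr (p.1 + 1) ++ ":\n" ++ p.2 ++ "\n\n",
        PySem.Str.len (PySem.Int.toStr (p.1 + 1) ++ ":\n" ++ p.2 ++ "\n\n") + 1)
      else if st.2.2 + PySem.Str.len (PySem.Int.toStr (p.1 + 1) ++ ":\n" ++ p.2 ++ "\n\n") + 1 ≤ cl then
        (st.1, st.2.1 ++ "\n" ++ (PySem.Int.toStr (p.1 + 1) ++ ":\n" ++ p.2 ++ "\n\n"),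
          st.2.2 + PySem.Str.len (PySem.Int.toStr (p.1 + 1) ++ ":\n" ++ p.2 ++ "\n\n") + 1)
      else (st.1 ++ [st.2.1], PySem.Int.toStr (p.1 + 1) ++ ":\n" ++ p.2 ++ "\n\n",
        PySem.Str.len (PySem.Int.toStr (p.1 + 1) ++ ":\n" ++ p.2 ++ "\n\n") + 1)) := by
  funext st p
  simp [pvAltStep]

-- ===== VERDICT (by name: the statement is the Claim_ definition above) =====
theorem label_and_chunk_texts_spec : Claim_equal_label_and_chunk_texts := by
  intro texts cl ml _
  unfold Spec_label_and_chunk_texts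
  unfold label_and_chunk_texts label_and_chunk_texts_alt pvGroupTextsByLength
    pvLabelTexts pvLabelMultilineTexts
  cases ml with
  | false =>
    simp only [Bool.false_eq_true, if_false]
    rw [pvFoldl_enumerate_snd, List.foldl_map]
    have h := pvLoop_eq cl (fun p => PySem.Int.toStr (p.1 + 1) ++ ": " ++ p.2)
      (PySem.List.enumerate texts 0) [] [] 0 rfl
    simp only [List.nil_append, List.map_nil] at h
    rw [h, pvJoinTexts_nil, ← pvAlt_eq_step_false]
  | true =>
    simp only [if_true]
    rw [pvFoldl_append_map, List.nil_append, pvFoldl_enumerate_snd, List.foldl_map]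
    have h := pvLoop_eq cl (fun p => PySem.Int.toStr (p.1 + 1) ++ ":\n" ++ p.2 ++ "\n\n")
      (PySem.List.enumerate texts 0) [] [] 0 rfl
    simp only [List.nil_append, List.map_nil] at h
    rw [h, pvJoinTexts_nil, ← pvAlt_eq_step_true]
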